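-- pv_equiv track=rewrite | github.com/Xian-xwz/academin-management-system | backend/app/services/knowledge_card.py | _choose_output_image_url
-- ===== SOURCE A (Python) =====
-- def _choose_output_image_url(candidates: list[str]) -> str | None:
--     cleaned: list[str] = []
--     for candidate in candidates:
--         url = candidate.strip().rstrip("，。；;、")
--         if not url or url in cleaned:
--             continue
--         if "/file-preview" in url:
--             continue
--         if "/console/api/workspaces/current/plugin/icon" in url:
--             continue
--         cleaned.append(url)
--     if not cleaned:
--         return None
--     for url in cleaned:
--         if "/files/tools/" in url:
--             return url
--     return cleaned[0]
-- ===== SOURCE B (Python) =====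
-- def _choose_output_image_url(candidates: list[str]) -> str | None:
--     fallback = None
--     tools = None
--     for candidate in candidates:
--         url = candidate.strip().rstrip("，。；;、")
--         if not url:
--             continue
--         if "/file-preview" in url:
--             continue
--         if "/console/api/workspaces/current/plugin/icon" in url:
--             continue
--         if tools is None and "/files/tools/" in url:
--             tools = url
--         if fallback is None:
--             fallback = url
--     return tools if tools is not None else fallback
-- ===== Notes on version B (the rewrite author's own statement) =====
-- stated objective: simpler
-- what changed: A builds a deduplicated cleaned list and then scans it twice (emptiness test plus a search for '/files/tools/'); B is a single pass over the candidates keeping only two locals (first surviving url and first '/files/tools/' url), dropping the intermediate list and the dedup entirely since only first occurrences can affect the result.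
import Mathlib
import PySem

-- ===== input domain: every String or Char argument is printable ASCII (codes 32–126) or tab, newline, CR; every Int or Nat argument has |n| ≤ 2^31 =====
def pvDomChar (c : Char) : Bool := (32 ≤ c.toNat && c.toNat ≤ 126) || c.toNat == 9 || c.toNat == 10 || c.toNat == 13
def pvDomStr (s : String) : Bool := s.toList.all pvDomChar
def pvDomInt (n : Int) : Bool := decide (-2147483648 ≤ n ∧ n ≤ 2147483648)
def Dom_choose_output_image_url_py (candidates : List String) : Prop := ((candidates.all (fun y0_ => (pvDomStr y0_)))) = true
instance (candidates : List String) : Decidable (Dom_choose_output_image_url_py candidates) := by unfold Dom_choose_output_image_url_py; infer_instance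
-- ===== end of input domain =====

-- B replaces A's cleaned-list accumulation plus second scan by a single pass keeping only
-- two locals (first surviving url, first '/files/tools/' url); objective: simpler.

-- shared cleaning step: candidate.strip().rstrip("，。；;、")
-- hand port of str.rstrip(chars) (PySem has no chars-variant of rstrip): drop trailing
-- characters that are in `chars` — exact for any character set.
def pvRstripChars (cs : List Char) (chars : List Char) : List Char :=
  (cs.reverse.dropWhile (fun c => chars.contains c)).reverse

def pvClean (s : String) : String :=
  String.ofList (pvRstripChars (PySem.Chars.strip s.toList) ("，。；;、".toList))

-- ===== PORT A =====
-- first loop of A: build `cleaned` (append if nonempty, not already present, passes both filters)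
def chooseA_loop (cleaned : List String) (cands : List String) : List String :=
  match cands with
  | [] => cleaned
  | c :: rest =>
    let url := pvClean c
    if url = "" ∨ cleaned.contains url = true then chooseA_loop cleaned rest
    else if PySem.Str.isIn "/file-preview" url = true then chooseA_loop cleaned rest
    else if PySem.Str.isIn "/console/api/workspaces/current/plugin/icon" url = true then chooseA_loop cleaned rest
    else chooseA_loop (cleaned ++ [url]) rest

-- second loop of A: return the first url containing "/files/tools/"
def chooseA_find (cleaned : List String) : Option String :=
  match cleaned with
  | [] => none
  | u :: rest => if PySem.Str.isIn "/files/tools/" u = true then some u else chooseA_find rest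

def choose_output_image_url_py (candidates : List String) : Option String :=
  let cleaned := chooseA_loop [] candidates
  if cleaned = [] then none
  else
    match chooseA_find cleaned with
    | some u => some u
    | none => cleaned.head?   -- cleaned[0]; the guard above ensures cleaned is nonempty

-- ===== PORT B =====
-- single pass carrying (fallback, tools)
def chooseB_loop (fallback : Option String) (tools : Option String)
    (cands : List String) : Option String × Option String :=
  match cands with
  | [] => (fallback, tools)
  | c :: rest =>
    let url := pvClean c
    if url = "" then chooseB_loop fallback tools rest
    else if PySem.Str.isIn "/file-preview" url = true then chooseB_loop fallback tools rest
    else if PySem.Str.isIn "/console/api/workspaces/current/plugin/icon" url = true then chooseB_loop fallback tools rest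
    else
      chooseB_loop
        (if fallback = none then some url else fallback)
        (if tools = none ∧ PySem.Str.isIn "/files/tools/" url = true then some url else tools)
        rest

def choose_output_image_url_py_alt (candidates : List String) : Option String :=
  match chooseB_loop none none candidates with
  | (_, some t) => some t
  | (fallback, none) => fallback

-- ===== PRECONDITION & SPEC =====
def Spec_choose_output_image_url_py (candidates : List String) (out : Option String) : Prop := out = choose_output_image_url_py_alt candidates
instance (candidates : List String) (out : Option String) : Decidable (Spec_choose_output_image_url_py candidates out) := by unfold Spec_choose_output_image_url_py; infer_instance

-- ===== CLAIM (what is proved, stated in full; the proofs are below) =====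
def Claim_equal_choose_output_image_url_py : Prop := ∀ (candidates : List String), Dom_choose_output_image_url_py candidates → Spec_choose_output_image_url_py candidates (choose_output_image_url_py candidates)

-- ===== LEMMAS AND PROOFS =====

-- if A's scan found nothing, no element of the list matches
theorem chooseA_find_eq_none (cleaned : List String)
    (h : chooseA_find cleaned = none) :
    ∀ u ∈ cleaned, PySem.Str.isIn "/files/tools/" u = false := by
  induction cleaned with
  | nil => intro u hu; cases hu
  | cons a t ih =>
    intro u hu
    simp only [chooseA_find] at h
    by_cases ha : PySem.Str.isIn "/files/tools/" a = true
    · rw [if_pos ha] at h; cases h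
    · rw [if_neg ha] at h
      rcases List.mem_cons.mp hu with rfl | hu'
      · exact Bool.eq_false_iff.mpr ha
      · exact ih h u hu'

-- how A's scan result changes when one url is appended at the back
theorem chooseA_find_append (cleaned : List String) (url : String) :
    chooseA_find (cleaned ++ [url]) =
      if chooseA_find cleaned = none ∧ PySem.Str.isIn "/files/tools/" url = true
      then some url else chooseA_find cleaned := by
  induction cleaned with
  | nil =>
    simp only [List.nil_append, chooseA_find]
    by_cases hp : PySem.Str.isIn "/files/tools/" url = true
    · rw [if_pos hp, if_pos ⟨trivial, hp⟩]
    · rw [if_neg hp, if_neg (fun h => hp h.2)]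
  | cons a t ih =>
    simp only [List.cons_append, chooseA_find]
    by_cases ha : PySem.Str.isIn "/files/tools/" a = true
    · have hs : (if PySem.Str.isIn "/files/tools/" a = true then some a else chooseA_find t) = some a := if_pos ha
      rw [if_pos ha, hs, if_neg (by rintro ⟨h, -⟩; cases h)]
    · have hs : (if PySem.Str.isIn "/files/tools/" a = true then some a else chooseA_find t) = chooseA_find t := if_neg ha
      rw [if_neg ha, hs, ih]

-- main invariant: running B's loop from the state that summarises `cleaned`
-- yields the state that summarises A's final cleaned list
set_option maxHeartbeats 1000000 in
theorem loop_invariant (cands : List String) (cleaned : List String) :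
    chooseB_loop cleaned.head? (chooseA_find cleaned) cands =
      ((chooseA_loop cleaned cands).head?, chooseA_find (chooseA_loop cleaned cands)) := by
  induction cands generalizing cleaned with
  | nil => simp [chooseA_loop, chooseB_loop]
  | cons c rest ih =>
    simp only [chooseA_loop, chooseB_loop]
    by_cases he : pvClean c = ""
    · rw [if_pos (Or.inl he), if_pos he]; exact ih cleaned
    · rw [if_neg he]
      by_cases hm : cleaned.contains (pvClean c) = true
      · -- url already in cleaned: A skips; B either skips (a filter fires) or its updates are no-ops
        rw [if_pos (Or.inr hm)]
        by_cases h1 : PySem.Str.isIn "/file-preview" (pvClean c) = true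
        · rw [if_pos h1]; exact ih cleaned
        · rw [if_neg h1]
          by_cases h2 : PySem.Str.isIn "/console/api/workspaces/current/plugin/icon" (pvClean c) = true
          · rw [if_pos h2]; exact ih cleaned
          · rw [if_neg h2]
            have hne : cleaned ≠ [] := by intro h; subst h; simp at hm
            have hfb : ¬ cleaned.head? = none := by
              cases cleaned with
              | nil => exact absurd rfl hne
              | cons a t => simp
            have htool : ¬ (chooseA_find cleaned = none ∧
                PySem.Str.isIn "/files/tools/" (pvClean c) = true) := by
              rintro ⟨hn, hp⟩
              have hf := chooseA_find_eq_none cleaned hn (pvClean c) (by simpa using hm)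
              rw [hf] at hp; exact Bool.false_ne_true hp
            rw [if_neg hfb, if_neg htool]
            exact ih cleaned
      · -- new url: A appends; B's new state summarises cleaned ++ [url]
        have hA : ¬ (pvClean c = "" ∨ cleaned.contains (pvClean c) = true) := by
          rintro (h | h)
          · exact he h
          · exact hm h
        rw [if_neg hA]
        by_cases h1 : PySem.Str.isIn "/file-preview" (pvClean c) = true
        · rw [if_pos h1, if_pos h1]; exact ih cleaned
        · rw [if_neg h1, if_neg h1]
          by_cases h2 : PySem.Str.isIn "/console/api/workspaces/current/plugin/icon" (pvClean c) = true
          · rw [if_pos h2, if_pos h2]; exact ih cleaned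
          · rw [if_neg h2, if_neg h2]
            have hh : (if cleaned.head? = none then some (pvClean c) else cleaned.head?) =
                (cleaned ++ [pvClean c]).head? := by cases cleaned <;> simp
            have hf : (if chooseA_find cleaned = none ∧
                  PySem.Str.isIn "/files/tools/" (pvClean c) = true
                  then some (pvClean c) else chooseA_find cleaned) =
                chooseA_find (cleaned ++ [pvClean c]) :=
              (chooseA_find_append cleaned (pvClean c)).symm
            rw [hh, hf]
            exact ih (cleaned ++ [pvClean c])

-- ===== VERDICT (by name: the statement is the Claim_ definition above) =====
theorem choose_output_image_url_py_spec : Claim_equal_choose_output_image_url_py := by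
  intro candidates _
  unfold Spec_choose_output_image_url_py choose_output_image_url_py choose_output_image_url_py_alt
  have h := loop_invariant candidates []
  simp only [chooseA_find, List.head?_nil] at h
  rw [h]
  cases hcl : chooseA_loop [] candidates with
  | nil => simp [chooseA_find]
  | cons a t =>
    rw [if_neg (List.cons_ne_nil a t)]
    cases hf : chooseA_find (a :: t) <;> rfl
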